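-- pv_equiv track=rewrite | github.com/siva-bathula/Brilliant | AlternateSolutionsInPython/AdventOfCode/2016/Day11.py | pairs_rep
-- ===== SOURCE A (Python) =====
-- def pairs_rep(floors):
--     pairs = list()
--     # Generate pairs
--     for i, floor in enumerate(floors):
--         for item in floor:
--             if item[1] == 'M':
--                 match = item[0] + "G"
--                 for j, search_floor in enumerate(floors):
--                     if match in search_floor:
--                         pairs.append((i, j))
--     return tuple(sorted(pairs))
-- ===== SOURCE B (Python) =====
-- def pairs_rep(floors):
--     # One pass: gen_table maps each item string to the increasing list of
--     # distinct floor indices containing it; chips collects (floor, key) per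
--     # microchip occurrence.  Then join chips against the table and sort.
--     gen_table = {}
--     chips = []
--     for i, floor in enumerate(floors):
--         for item in floor:
--             js = gen_table.setdefault(item, [])
--             if not js or js[-1] != i:
--                 js.append(i)
--             if item[1] == 'M':
--                 chips.append((i, item[0] + 'G'))
--     pairs = [(i, j) for i, key in chips for j in gen_table.get(key, [])]
--     return tuple(sorted(pairs))
-- ===== Notes on version B (the rewrite author's own statement) =====
-- stated objective: alternative
-- what changed: B makes one pass building an item->floor-indices table plus a chip-occurrence list and then joins them, instead of A's rescanning every floor for the matching generator once per microchip occurrence.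
import Mathlib
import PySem

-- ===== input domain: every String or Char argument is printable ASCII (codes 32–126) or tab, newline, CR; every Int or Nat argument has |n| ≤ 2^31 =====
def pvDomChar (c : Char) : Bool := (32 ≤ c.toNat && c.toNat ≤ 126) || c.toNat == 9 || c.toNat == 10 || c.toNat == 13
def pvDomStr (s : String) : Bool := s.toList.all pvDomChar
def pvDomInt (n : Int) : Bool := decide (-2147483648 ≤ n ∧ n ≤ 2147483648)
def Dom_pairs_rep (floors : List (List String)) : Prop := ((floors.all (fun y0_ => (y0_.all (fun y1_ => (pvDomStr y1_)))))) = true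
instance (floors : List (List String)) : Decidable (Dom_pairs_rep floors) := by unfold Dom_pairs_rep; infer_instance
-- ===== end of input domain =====

-- B builds an item→floor-indices table and a chip list in one pass, then joins them (alternative decomposition, no repeated floor scans).

-- ===== PORT A =====
def pairs_rep (floors : List (List String)) : List (Int × Int) :=
  let pairs : List (Int × Int) :=
    (PySem.List.enumerate floors).foldl (fun pairs p =>
      p.2.foldl (fun pairs item =>
        match PySem.Str.pyGet? item 1 with      -- item[1] (IndexError → none, outside Pre_)
        | none => pairs
        | some c1 =>
          if c1 = 'M' then
            let mtch : String :=
              match PySem.Str.pyGet? item 0 with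
              | some c0 => String.ofList [c0, 'G']  -- item[0] + "G"
              | none => ""
            (PySem.List.enumerate floors).foldl (fun pairs q =>
              if mtch ∈ q.2 then pairs ++ [(p.1, q.1)] else pairs) pairs
          else pairs) pairs) []
  PySem.List.sorted2 pairs (fun x => x.1) (fun x => x.2) false

-- ===== PORT B =====
-- one step of B's single pass over the items of floor i (updates gen_table and chips)
def pvBStep (i : Int) (st : PySem.Dict String (List Int) × List (Int × String))
    (item : String) : PySem.Dict String (List Int) × List (Int × String) :=
  let js := st.1.getD item []
  let gen := if js = [] ∨ js.getLast? ≠ some i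
             then st.1.insert item (js ++ [i]) else st.1.insert item js
  let chips :=
    match PySem.Str.pyGet? item 1 with
    | none => st.2
    | some c1 =>
      if c1 = 'M' then
        st.2 ++ [(i, match PySem.Str.pyGet? item 0 with
                     | some c0 => String.ofList [c0, 'G']
                     | none => "")]
      else st.2
  (gen, chips)

def pairs_rep_alt (floors : List (List String)) : List (Int × Int) :=
  let st :=
    (PySem.List.enumerate floors).foldl
      (fun st p => p.2.foldl (pvBStep p.1) st) (PySem.Dict.empty, [])
  let pairs := st.2.flatMap (fun c => (st.1.getD c.2 []).map (fun j => (c.1, j)))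
  PySem.List.sorted2 pairs (fun x => x.1) (fun x => x.2) false

-- ===== PRECONDITION & SPEC =====
-- Pre_ excludes exactly the inputs where Python raises IndexError: some item shorter
-- than 2 characters (item[1] is evaluated for every item).
def Pre_pairs_rep (floors : List (List String)) : Prop :=
  ∀ fl ∈ floors, ∀ item ∈ fl, 2 ≤ item.toList.length
instance (floors : List (List String)) : Decidable (Pre_pairs_rep floors) := by
  unfold Pre_pairs_rep; infer_instance
def pvWitness_pairs_rep : List (List String) := [["HM", "LG"], ["HG"], ["LM", "HM"]]
def Spec_pairs_rep (floors : List (List String)) (out : List (Int × Int)) : Prop := out = pairs_rep_alt floors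
instance (floors : List (List String)) (out : List (Int × Int)) : Decidable (Spec_pairs_rep floors out) := by unfold Spec_pairs_rep; infer_instance

-- ===== CLAIM (what is proved, stated in full; the proofs are below) =====
def Claim_equal_pairs_rep : Prop := ∀ (floors : List (List String)), Dom_pairs_rep floors → Pre_pairs_rep floors → Spec_pairs_rep floors (pairs_rep floors)

-- ===== LEMMAS AND PROOFS =====

-- is item a microchip? (item[1] == 'M'; false when item[1] raises)
def pvChip (item : String) : Bool := PySem.Str.pyGet? item 1 == some 'M'
-- the generator key string item[0] + "G"
def pvKey (item : String) : String :=
  match PySem.Str.pyGet? item 0 with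
  | some c0 => String.ofList [c0, 'G']
  | none => ""
-- specification of gen_table[k]: indices (with their floors enumerated) whose floor contains k
def pvGen (k : String) (e : List (Int × List String)) : List Int :=
  (e.filter (fun q => decide (k ∈ q.2))).map (·.1)

theorem a_inner (e : List (Int × List String)) (i : Int) (mtch : String)
    (acc : List (Int × Int)) :
    e.foldl (fun pairs q => if mtch ∈ q.2 then pairs ++ [(i, q.1)] else pairs) acc
      = acc ++ (pvGen mtch e).map (fun j => (i, j)) := by
  rw [PySem.List.foldl_append_ite]
  simp [pvGen, List.map_map, Function.comp_def]

theorem a_mid (e : List (Int × List String)) (i : Int) (items : List String)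
    (acc : List (Int × Int)) :
    items.foldl (fun pairs item =>
        match PySem.Str.pyGet? item 1 with
        | none => pairs
        | some c1 =>
          if c1 = 'M' then
            let mtch : String :=
              match PySem.Str.pyGet? item 0 with
              | some c0 => String.ofList [c0, 'G']
              | none => ""
            e.foldl (fun pairs q =>
              if mtch ∈ q.2 then pairs ++ [(i, q.1)] else pairs) pairs
          else pairs) acc
      = acc ++ items.flatMap (fun item =>
          if pvChip item then (pvGen (pvKey item) e).map (fun j => (i, j)) else []) := by
  induction items generalizing acc with
  | nil => simp
  | cons item rest ih =>
    simp only [List.foldl_cons, List.flatMap_cons]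
    rw [ih]
    rcases h : PySem.Str.pyGet? item 1 with _ | c1 <;>
      (have h' := h; simp only [PySem.Str.pyGet?_eq, PySem.Chars.pyGet?_eq_listPyGet?] at h')
    · simp [pvChip, h']
    · by_cases hc : c1 = 'M'
      · subst hc
        simp only [a_inner, pvChip, pvKey]
        simp [h']
      · simp [pvChip, h', hc]

theorem a_outer (e l : List (Int × List String)) (acc : List (Int × Int)) :
    l.foldl (fun pairs p =>
      p.2.foldl (fun pairs item =>
        match PySem.Str.pyGet? item 1 with
        | none => pairs
        | some c1 =>
          if c1 = 'M' then
            let mtch : String :=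
              match PySem.Str.pyGet? item 0 with
              | some c0 => String.ofList [c0, 'G']
              | none => ""
            e.foldl (fun pairs q =>
              if mtch ∈ q.2 then pairs ++ [(p.1, q.1)] else pairs) pairs
          else pairs) pairs) acc
      = acc ++ l.flatMap (fun p => p.2.flatMap (fun item =>
          if pvChip item then (pvGen (pvKey item) e).map (fun j => (p.1, j)) else [])) := by
  induction l generalizing acc with
  | nil => simp
  | cons p rest ih =>
    simp only [List.foldl_cons, List.flatMap_cons]
    rw [a_mid, ih, List.append_assoc]

theorem b_inner_snd (i : Int) (items : List String)
    (st : PySem.Dict String (List Int) × List (Int × String)) :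
    (items.foldl (pvBStep i) st).2
      = st.2 ++ (items.filter pvChip).map (fun it => (i, pvKey it)) := by
  induction items generalizing st with
  | nil => simp
  | cons item rest ih =>
    simp only [List.foldl_cons, List.filter_cons]
    rw [ih]
    rcases h : PySem.Str.pyGet? item 1 with _ | c1 <;>
      (have h' := h; simp only [PySem.Str.pyGet?_eq, PySem.Chars.pyGet?_eq_listPyGet?] at h')
    · simp [pvBStep, pvChip, h']
    · by_cases hc : c1 = 'M'
      · subst hc
        simp [pvBStep, pvChip, pvKey, h']
      · simp [pvBStep, pvChip, h', hc]

theorem b_inner_fst (i : Int) (items : List String)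
    (st : PySem.Dict String (List Int) × List (Int × String)) (k : String) :
    ((items.foldl (pvBStep i) st).1).getD k []
      = if k ∈ items ∧ (st.1.getD k [] = [] ∨ (st.1.getD k []).getLast? ≠ some i)
        then st.1.getD k [] ++ [i] else st.1.getD k [] := by
  induction items generalizing st with
  | nil => simp
  | cons item rest ih =>
    simp only [List.foldl_cons]
    rw [ih]
    by_cases hk : k = item
    · subst hk
      by_cases hcond : st.1.getD k [] = [] ∨ (st.1.getD k []).getLast? ≠ some i
      · -- i is appended now; afterwards the stored list ends with i, so never again
        simp only [pvBStep, if_pos hcond, PySem.Dict.getD_insert]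
        simp [hcond]
      · simp only [pvBStep, if_neg hcond, PySem.Dict.getD_insert]
        simp [hcond]
    · have hgd : ((pvBStep i st item).1).getD k [] = st.1.getD k [] := by
        simp only [pvBStep]
        split <;> simp [PySem.Dict.getD_insert, hk]
      rw [hgd]
      simp [hk]

theorem pvGen_cons (k : String) (i : Int) (fl : List String)
    (rest : List (Int × List String)) :
    pvGen k ((i, fl) :: rest) = (if k ∈ fl then [i] else []) ++ pvGen k rest := by
  simp only [pvGen, List.filter_cons]
  by_cases h : k ∈ fl <;> simp [h]

theorem b_outer (fls : List (List String)) (s : Int)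
    (st : PySem.Dict String (List Int) × List (Int × String))
    (H : ∀ k, ∀ x ∈ st.1.getD k [], x < s) (k : String) :
    (((PySem.List.enumerate fls s).foldl (fun st p => p.2.foldl (pvBStep p.1) st) st).1).getD k []
      = st.1.getD k [] ++ pvGen k (PySem.List.enumerate fls s) := by
  induction fls generalizing s st with
  | nil => simp [PySem.List.enumerate, pvGen]
  | cons fl rest ih =>
    rw [PySem.List.enumerate_cons]
    simp only [List.foldl_cons]
    have hcond : st.1.getD k [] = [] ∨ (st.1.getD k []).getLast? ≠ some s := by
      rcases hnil : st.1.getD k [] with _ | _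
      · exact Or.inl rfl
      · refine Or.inr fun hlast => ?_
        have hmem : s ∈ st.1.getD k [] := by
          rw [hnil]; exact List.mem_of_getLast? (hnil ▸ hlast)
        exact absurd (H k s hmem) (by omega)
    have h1 : ((fl.foldl (pvBStep s) st).1).getD k []
        = st.1.getD k [] ++ (if k ∈ fl then [s] else []) := by
      rw [b_inner_fst]
      by_cases hm : k ∈ fl
      · simp [hm, hcond]
      · simp [hm]
    have H' : ∀ k', ∀ x ∈ ((fl.foldl (pvBStep s) st).1).getD k' [], x < s + 1 := by
      intro k' x hx
      rw [b_inner_fst] at hx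
      split at hx
      · rcases List.mem_append.mp hx with h | h
        · exact lt_trans (H k' x h) (by omega)
        · simp at h; omega
      · exact lt_trans (H k' x hx) (by omega)
    rw [ih (s + 1) _ H', h1, pvGen_cons, List.append_assoc]

theorem b_outer_snd (fls : List (List String)) (s : Int)
    (st : PySem.Dict String (List Int) × List (Int × String)) :
    ((PySem.List.enumerate fls s).foldl (fun st p => p.2.foldl (pvBStep p.1) st) st).2
      = st.2 ++ (PySem.List.enumerate fls s).flatMap
          (fun p => (p.2.filter pvChip).map (fun it => (p.1, pvKey it))) := by
  induction fls generalizing s st with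
  | nil => simp [PySem.List.enumerate]
  | cons fl rest ih =>
    rw [PySem.List.enumerate_cons]
    simp only [List.foldl_cons, List.flatMap_cons]
    rw [ih, b_inner_snd, List.append_assoc]

theorem per_floor (e : List (Int × List String)) (i : Int) (items : List String) :
    items.flatMap (fun item =>
        if pvChip item then (pvGen (pvKey item) e).map (fun j => (i, j)) else [])
      = ((items.filter pvChip).map (fun it => (i, pvKey it))).flatMap
          (fun c => (pvGen c.2 e).map (fun j => (c.1, j))) := by
  induction items with
  | nil => rfl
  | cons it rest ih =>
    simp only [List.flatMap_cons, List.filter_cons]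
    by_cases h : pvChip it <;> simp [h, ih]

-- ===== VERDICT (by name: the statement is the Claim_ definition above) =====
theorem pairs_rep_spec : Claim_equal_pairs_rep := by
  intro floors _ _
  show pairs_rep floors = pairs_rep_alt floors
  unfold pairs_rep pairs_rep_alt
  simp only []
  rw [a_outer, b_outer_snd]
  have hg : ∀ k, (((PySem.List.enumerate floors).foldl
        (fun st p => p.2.foldl (pvBStep p.1) st)
        ((PySem.Dict.empty : PySem.Dict String (List Int)), ([] : List (Int × String)))).1).getD k []
      = pvGen k (PySem.List.enumerate floors) := by
    intro k
    rw [b_outer floors 0 _ (by simp) k]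
    simp
  simp only [hg, List.nil_append]
  congr 1
  rw [List.flatMap_assoc]
  exact List.flatMap_congr (fun p _ => per_floor _ p.1 p.2)
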